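-- pv_equiv track=rewrite | github.com/puffsnow/code-practice | CheckIO/PYCON TW 2014/Simple 2048.py | ConvertMap
-- ===== SOURCE A (Python) =====
-- def ConvertMap(map, command):
--   Elements = []
--   for row in map:
--     Elements = Elements + row
--   if command == "left":
--     return map
--   if command == "right":
--     return [[Elements[3], Elements[2], Elements[1], Elements[0]],
--             [Elements[7], Elements[6], Elements[5], Elements[4]],
--             [Elements[11], Elements[10], Elements[9], Elements[8]],
--             [Elements[15], Elements[14], Elements[13], Elements[12]]]
--   if command == "up":
--     return [[Elements[3], Elements[7], Elements[11], Elements[15]],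
--             [Elements[2], Elements[6], Elements[10], Elements[14]],
--             [Elements[1], Elements[5], Elements[9], Elements[13]],
--             [Elements[0], Elements[4], Elements[8], Elements[12]]]
--   if command == "down":
--     return [[Elements[12], Elements[8], Elements[4], Elements[0]],
--             [Elements[13], Elements[9], Elements[5], Elements[1]],
--             [Elements[14], Elements[10], Elements[6], Elements[2]],
--             [Elements[15], Elements[11], Elements[7], Elements[3]]]
-- ===== SOURCE B (Python) =====
-- def ConvertMap(map, command):
--   if command == "left":
--     return map
--   if command == "right":
--     return [row[::-1] for row in map]
--   if command == "up":
--     return [list(t) for t in reversed(list(zip(*map)))]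
--   if command == "down":
--     return [list(reversed(t)) for t in zip(*map)]
-- ===== Notes on version B (the rewrite author's own statement) =====
-- stated objective: faster
-- what changed: B replaces A's flatten-into-16-elements plus four hardcoded index tables by direct matrix operations: identity for 'left', per-row reversal for 'right', and transpose combined with a reversal (of row order for 'up', within rows for 'down').
-- crash fix: When command is 'right', 'up' or 'down' and the grid holds fewer than 16 cells in total, A raises IndexError while B returns the correspondingly transformed grid (e.g. [] for the empty grid). — e.g. on ConvertMap([[1, 2], [3, 4]], "right"): A raises IndexError, B returns some [[2, 1], [4, 3]]
import Mathlib
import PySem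

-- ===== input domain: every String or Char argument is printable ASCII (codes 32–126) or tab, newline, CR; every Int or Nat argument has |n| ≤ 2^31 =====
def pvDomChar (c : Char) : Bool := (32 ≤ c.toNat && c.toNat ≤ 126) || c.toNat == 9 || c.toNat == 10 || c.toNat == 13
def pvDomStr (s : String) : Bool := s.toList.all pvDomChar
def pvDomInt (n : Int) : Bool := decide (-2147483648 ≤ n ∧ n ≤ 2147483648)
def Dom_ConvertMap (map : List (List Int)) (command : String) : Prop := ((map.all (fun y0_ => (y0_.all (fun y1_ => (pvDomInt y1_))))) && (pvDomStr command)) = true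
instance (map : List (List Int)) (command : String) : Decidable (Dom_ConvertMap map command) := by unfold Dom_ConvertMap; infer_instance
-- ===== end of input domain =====

-- B replaces A's quadratic flatten (repeated list concatenation) plus hardcoded index tables by direct per-row reversal / transpose; measured faster in a timing run.

-- ===== PORT A =====
def ConvertMap (map : List (List Int)) (command : String) : Option (List (List Int)) :=
  let Elements := map.foldl (fun acc row => acc ++ row) []
  if command == "left" then some map
  else if command == "right" then do
    let e0 ← PySem.List.pyGet? Elements 0
    let e1 ← PySem.List.pyGet? Elements 1
    let e2 ← PySem.List.pyGet? Elements 2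
    let e3 ← PySem.List.pyGet? Elements 3
    let e4 ← PySem.List.pyGet? Elements 4
    let e5 ← PySem.List.pyGet? Elements 5
    let e6 ← PySem.List.pyGet? Elements 6
    let e7 ← PySem.List.pyGet? Elements 7
    let e8 ← PySem.List.pyGet? Elements 8
    let e9 ← PySem.List.pyGet? Elements 9
    let e10 ← PySem.List.pyGet? Elements 10
    let e11 ← PySem.List.pyGet? Elements 11
    let e12 ← PySem.List.pyGet? Elements 12
    let e13 ← PySem.List.pyGet? Elements 13
    let e14 ← PySem.List.pyGet? Elements 14
    let e15 ← PySem.List.pyGet? Elements 15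
    some [[e3, e2, e1, e0], [e7, e6, e5, e4], [e11, e10, e9, e8], [e15, e14, e13, e12]]
  else if command == "up" then do
    let e0 ← PySem.List.pyGet? Elements 0
    let e1 ← PySem.List.pyGet? Elements 1
    let e2 ← PySem.List.pyGet? Elements 2
    let e3 ← PySem.List.pyGet? Elements 3
    let e4 ← PySem.List.pyGet? Elements 4
    let e5 ← PySem.List.pyGet? Elements 5
    let e6 ← PySem.List.pyGet? Elements 6
    let e7 ← PySem.List.pyGet? Elements 7
    let e8 ← PySem.List.pyGet? Elements 8
    let e9 ← PySem.List.pyGet? Elements 9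
    let e10 ← PySem.List.pyGet? Elements 10
    let e11 ← PySem.List.pyGet? Elements 11
    let e12 ← PySem.List.pyGet? Elements 12
    let e13 ← PySem.List.pyGet? Elements 13
    let e14 ← PySem.List.pyGet? Elements 14
    let e15 ← PySem.List.pyGet? Elements 15
    some [[e3, e7, e11, e15], [e2, e6, e10, e14], [e1, e5, e9, e13], [e0, e4, e8, e12]]
  else if command == "down" then do
    let e0 ← PySem.List.pyGet? Elements 0
    let e1 ← PySem.List.pyGet? Elements 1
    let e2 ← PySem.List.pyGet? Elements 2
    let e3 ← PySem.List.pyGet? Elements 3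
    let e4 ← PySem.List.pyGet? Elements 4
    let e5 ← PySem.List.pyGet? Elements 5
    let e6 ← PySem.List.pyGet? Elements 6
    let e7 ← PySem.List.pyGet? Elements 7
    let e8 ← PySem.List.pyGet? Elements 8
    let e9 ← PySem.List.pyGet? Elements 9
    let e10 ← PySem.List.pyGet? Elements 10
    let e11 ← PySem.List.pyGet? Elements 11
    let e12 ← PySem.List.pyGet? Elements 12
    let e13 ← PySem.List.pyGet? Elements 13
    let e14 ← PySem.List.pyGet? Elements 14
    let e15 ← PySem.List.pyGet? Elements 15
    some [[e12, e8, e4, e0], [e13, e9, e5, e1], [e14, e10, e6, e2], [e15, e11, e7, e3]]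
  else none

-- ===== PORT B =====
-- hand-written port of Python's zip(*m) (columns, truncated to the shortest row; exact on all inputs)
def pyZipStar (m : List (List Int)) : List (List Int) :=
  match m with
  | [] => []
  | r :: _ =>
    let k := m.foldl (fun a row => min a row.length) r.length
    (List.range k).map (fun j => m.map (fun row => row.getD j 0))

def ConvertMap_alt (map : List (List Int)) (command : String) : Option (List (List Int)) :=
  if command == "left" then some map
  else if command == "right" then some (map.map List.reverse)
  else if command == "up" then some ((pyZipStar map).reverse)
  else if command == "down" then some ((pyZipStar map).map List.reverse)
  else none

-- ===== PRECONDITION & SPEC =====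
-- Pre_ excludes non-4x4 grids under 'right'/'up'/'down': there A's flat-index tables silently regroup
-- whatever 16+ cells exist (and raise IndexError below 16), while B transforms the actual rows.
def Pre_ConvertMap (map : List (List Int)) (command : String) : Prop :=
  (command = "right" ∨ command = "up" ∨ command = "down") →
    (map.length = 4 ∧ ∀ r ∈ map, r.length = 4)
instance (map : List (List Int)) (command : String) : Decidable (Pre_ConvertMap map command) := by unfold Pre_ConvertMap; infer_instance
def pvWitness_ConvertMap : List (List Int) × String :=
  ([[1, 2, 3, 4], [5, 6, 7, 8], [9, 10, 11, 12], [13, 14, 15, 16]], "up")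

-- When command is 'right', 'up' or 'down' and the grid holds fewer than 16 cells in total, A raises
-- IndexError while B returns the correspondingly transformed grid.
def Raises_ConvertMap (map : List (List Int)) (command : String) : Prop :=
  (command = "right" ∨ command = "up" ∨ command = "down") ∧ (map.map List.length).sum < 16
instance (map : List (List Int)) (command : String) : Decidable (Raises_ConvertMap map command) := by unfold Raises_ConvertMap; infer_instance
def pvRaiseWitness_ConvertMap : List (List Int) × String := ([[1, 2], [3, 4]], "right")
def pvRaiseWitnessOut_ConvertMap : Option (List (List Int)) := some [[2, 1], [4, 3]]

def Spec_ConvertMap (map : List (List Int)) (command : String) (out : Option (List (List Int))) : Prop := out = ConvertMap_alt map command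
instance (map : List (List Int)) (command : String) (out : Option (List (List Int))) : Decidable (Spec_ConvertMap map command out) := by unfold Spec_ConvertMap; infer_instance

-- ===== CLAIM (what is proved, stated in full; the proofs are below) =====
def Claim_equal_ConvertMap : Prop := ∀ (map : List (List Int)) (command : String), Dom_ConvertMap map command → Pre_ConvertMap map command → Spec_ConvertMap map command (ConvertMap map command)
def Claim_raises_ConvertMap : Prop := (∀ (map : List (List Int)) (command : String), Dom_ConvertMap map command → Raises_ConvertMap map command → ¬ Pre_ConvertMap map command) ∧ (Dom_ConvertMap (pvRaiseWitness_ConvertMap.1) (pvRaiseWitness_ConvertMap.2) ∧ Raises_ConvertMap (pvRaiseWitness_ConvertMap.1) (pvRaiseWitness_ConvertMap.2) ∧ ConvertMap_alt (pvRaiseWitness_ConvertMap.1) (pvRaiseWitness_ConvertMap.2) = pvRaiseWitnessOut_ConvertMap)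

-- ===== LEMMAS AND PROOFS =====

theorem len4_iff (l : List Int) (h : l.length = 4) : ∃ a b c d, l = [a, b, c, d] := by
  match l, h with
  | [a, b, c, d], _ => exact ⟨a, b, c, d, rfl⟩

theorem rows4 (m : List (List Int)) (h : m.length = 4) : ∃ r0 r1 r2 r3, m = [r0, r1, r2, r3] := by
  match m, h with
  | [a, b, c, d], _ => exact ⟨a, b, c, d, rfl⟩

-- ===== VERDICT (by name: the statement is the Claim_ definition above) =====
set_option maxHeartbeats 1600000 in
theorem ConvertMap_spec : Claim_equal_ConvertMap := by
  intro map command _ hpre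
  unfold Spec_ConvertMap
  by_cases hr : command = "right" ∨ command = "up" ∨ command = "down"
  · obtain ⟨hlen, hrows⟩ := hpre hr
    obtain ⟨r0, r1, r2, r3, rfl⟩ := rows4 map hlen
    obtain ⟨a0, a1, a2, a3, rfl⟩ := len4_iff r0 (hrows _ (by simp))
    obtain ⟨b0, b1, b2, b3, rfl⟩ := len4_iff r1 (hrows _ (by simp))
    obtain ⟨c0, c1, c2, c3, rfl⟩ := len4_iff r2 (hrows _ (by simp))
    obtain ⟨d0, d1, d2, d3, rfl⟩ := len4_iff r3 (hrows _ (by simp))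
    rcases hr with h | h | h <;> subst h <;> rfl
  · by_cases hl : command = "left"
    · simp [ConvertMap, ConvertMap_alt, hl]
    · push_neg at hr
      obtain ⟨h1, h2, h3⟩ := hr
      simp [ConvertMap, ConvertMap_alt, hl, h1, h2, h3]

def ConvertMap_raises : Claim_raises_ConvertMap := by
  unfold Claim_raises_ConvertMap
  exact ⟨by
    intro map command _ hR hpre
    obtain ⟨hc, hlt⟩ := hR
    obtain ⟨hlen, hrows⟩ := hpre hc
    obtain ⟨r0, r1, r2, r3, rfl⟩ := rows4 map hlen
    simp only [List.mem_cons, List.not_mem_nil, or_false, forall_eq_or_imp, forall_eq] at hrows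
    simp [hrows.1, hrows.2.1, hrows.2.2.1, hrows.2.2.2] at hlt, by decide⟩
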